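-- pv_equiv track=rewrite | github.com/SoftwareUnderstanding/inspect4py | test/test_files/Chowlk/source/chowlk/utils.py | create_label
-- ===== SOURCE A (Python) =====
-- def create_label(uri, type):
--
--     uppers_pos = []
--     for i, char in enumerate(uri):
--         if char.isupper():
--             uppers_pos.append(i)
--     uppers_pos.insert(0, 0) if 0 not in uppers_pos else uppers_pos
--     words = []
--
--     for i, current_pos in enumerate(uppers_pos):
--
--         if i+1 < len(uppers_pos):
--             next_pos = uppers_pos[i + 1]
--             word = uri[current_pos:next_pos]
--         else:
--             word = uri[current_pos:]
--
--         word = word.lower() if type == "property" else word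
--         words.append(word)
--
--     label = " ".join(words)
--
--     return label
-- ===== SOURCE B (Python) =====
-- def create_label(uri, type):
--     words = []
--     current = ""
--     for i, char in enumerate(uri):
--         if char.isupper() and i != 0:
--             words.append(current)
--             current = char
--         else:
--             current += char
--     words.append(current)
--     if type == "property":
--         words = [w.lower() for w in words]
--     return " ".join(words)
-- ===== Notes on version B (the rewrite author's own statement) =====
-- stated objective: simpler
-- what changed: Replaces A's two-pass scheme (collect uppercase positions into an index list, then slice the string between consecutive positions) with a single pass that accumulates the current word and flushes it at each non-leading uppercase letter.
import Mathlib
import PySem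

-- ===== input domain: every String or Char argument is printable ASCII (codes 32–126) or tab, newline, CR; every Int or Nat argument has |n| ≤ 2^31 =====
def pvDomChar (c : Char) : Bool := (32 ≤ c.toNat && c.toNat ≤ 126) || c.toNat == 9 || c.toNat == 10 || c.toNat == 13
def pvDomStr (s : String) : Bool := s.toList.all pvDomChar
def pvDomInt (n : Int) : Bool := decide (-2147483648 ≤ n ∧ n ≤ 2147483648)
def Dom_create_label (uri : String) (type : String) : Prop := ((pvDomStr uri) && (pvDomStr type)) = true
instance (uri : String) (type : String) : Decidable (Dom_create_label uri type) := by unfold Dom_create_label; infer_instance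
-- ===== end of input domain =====

-- B replaces A's two-pass scheme (index list of uppercase positions, then slicing between
-- consecutive positions) with one accumulator pass over the characters: simpler decomposition, same cost.

-- ===== PORT A =====
def create_label (uri : String) (type : String) : String :=
  let l := uri.toList
  let uppers_pos : List Int :=
    (PySem.List.enumerate l 0).foldl
      (fun acc p => if PySem.Chars.isupper p.2 then acc ++ [p.1] else acc) []
  let uppers_pos := if (0 : Int) ∈ uppers_pos then uppers_pos else PySem.List.insert uppers_pos 0 0
  let words : List (List Char) :=
    (PySem.List.enumerate uppers_pos 0).foldl
      (fun ws p =>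
        let word :=
          if p.1 + 1 < (uppers_pos.length : Int) then
            PySem.List.slice l (some p.2) (some (PySem.List.pyGetD uppers_pos (p.1 + 1) 0))
          else
            PySem.List.slice l (some p.2) none
        let word := if type == "property" then PySem.Chars.lower word else word
        ws ++ [word]) []
  String.ofList (PySem.Chars.join [' '] words)

-- ===== PORT B =====
def create_label_alt (uri : String) (type : String) : String :=
  let st := (PySem.List.enumerate uri.toList 0).foldl
    (fun (st : List (List Char) × List Char) p =>
      if PySem.Chars.isupper p.2 && p.1 != 0 then (st.1 ++ [st.2], [p.2])
      else (st.1, st.2 ++ [p.2])) ([], [])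
  let words := st.1 ++ [st.2]
  let words := if type == "property" then words.map PySem.Chars.lower else words
  String.ofList (PySem.Chars.join [' '] words)

-- ===== PRECONDITION & SPEC =====
def Spec_create_label (uri : String) (type : String) (out : String) : Prop := out = create_label_alt uri type
instance (uri : String) (type : String) (out : String) : Decidable (Spec_create_label uri type out) := by unfold Spec_create_label; infer_instance

-- ===== CLAIM (what is proved, stated in full; the proofs are below) =====
def Claim_equal_create_label : Prop := ∀ (uri : String) (type : String), Dom_create_label uri type → Spec_create_label uri type (create_label uri type)

-- ===== LEMMAS AND PROOFS =====

-- positions (as Nat, starting at n) of the uppercase chars of a list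
def upPos (n : Nat) : List Char → List Nat
  | [] => []
  | c :: r => if PySem.Chars.isupper c then n :: upPos (n + 1) r else upPos (n + 1) r

-- A's words, slicing l between consecutive Int positions
def wordsOfInt (l : List Char) : List Int → List (List Char)
  | [] => []
  | [p] => [PySem.List.slice l (some p) none]
  | p :: q :: t => PySem.List.slice l (some p) (some q) :: wordsOfInt l (q :: t)

-- the same words in Nat drop/take form
def wordsN (l : List Char) (a : Nat) : List Nat → List (List Char)
  | [] => [l.drop a]
  | p :: t => (l.drop a).take (p - a) :: wordsN l p t

-- B's accumulator recursion
def goW (cur : List Char) : List Char → List (List Char)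
  | [] => [cur]
  | c :: r => if PySem.Chars.isupper c then cur :: goW [c] r else goW (cur ++ [c]) r

theorem upPos_ge (r : List Char) : ∀ (n : Nat), ∀ p ∈ upPos n r, n ≤ p := by
  induction r with
  | nil => intro n p hp; simp [upPos] at hp
  | cons c r ih =>
    intro n p hp
    by_cases h : PySem.Chars.isupper c
    · simp [upPos, h] at hp
      rcases hp with h0 | h0
      · omega
      · have := ih (n + 1) p h0; omega
    · simp [upPos, h] at hp
      have := ih (n + 1) p hp; omega

theorem firstFold (r : List Char) : ∀ (n : Nat) (acc : List Int),
    (PySem.List.enumerate r (n : Int)).foldl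
      (fun acc p => if PySem.Chars.isupper p.2 then acc ++ [p.1] else acc) acc
      = acc ++ (upPos n r).map (fun (k : Nat) => (k : Int)) := by
  induction r with
  | nil => intro n acc; simp [PySem.List.enumerate, upPos]
  | cons c r ih =>
    intro n acc
    rw [PySem.List.enumerate_cons]
    have hc : ((n : Int) + 1) = ((n + 1 : Nat) : Int) := by push_cast; ring
    by_cases h : PySem.Chars.isupper c
    · simp only [List.foldl_cons, h, if_true, hc, ih (n + 1), upPos]
      simp
    · simp only [List.foldl_cons, h, hc, ih (n + 1)]
      simp [upPos, h]

theorem insert_zero_eq {α : Type} (l : List α) (x : α) : PySem.List.insert l 0 x = x :: l := by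
  simp [PySem.List.insert, PySem.List.sliceIndices]

-- after the "prepend 0 if missing" step, the positions are 0 followed by upPos 1 of the tail
theorem branch_eq (l : List Char) :
    (if (0 : Int) ∈ (upPos 0 l).map (fun (k : Nat) => (k : Int)) then (upPos 0 l).map (fun (k : Nat) => (k : Int))
     else PySem.List.insert ((upPos 0 l).map (fun (k : Nat) => (k : Int))) 0 0)
      = (0 :: upPos 1 l.tail).map (fun (k : Nat) => (k : Int)) := by
  cases l with
  | nil => simp [upPos, insert_zero_eq]
  | cons c r =>
    by_cases h : PySem.Chars.isupper c
    · have h1 : upPos 0 (c :: r) = 0 :: upPos 1 r := by simp [upPos, h]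
      rw [h1]
      simp
    · have h1 : upPos 0 (c :: r) = upPos 1 r := by simp [upPos, h]
      rw [h1]
      have h0 : (0 : Int) ∉ (upPos 1 r).map (fun (k : Nat) => (k : Int)) := by
        intro hmem
        rcases List.mem_map.1 hmem with ⟨p, hp, he⟩
        have := upPos_ge r 1 p hp
        omega
      rw [if_neg h0, insert_zero_eq]
      simp

theorem innerFold (l : List Char) (f : List Char → List Char) (ps : List Int) :
    ∀ (suf : List Int) (n : Nat) (acc : List (List Char)), ps.drop n = suf →
    (PySem.List.enumerate suf (n : Int)).foldl
      (fun ws p =>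
        let word :=
          if p.1 + 1 < (ps.length : Int) then
            PySem.List.slice l (some p.2) (some (PySem.List.pyGetD ps (p.1 + 1) 0))
          else
            PySem.List.slice l (some p.2) none
        ws ++ [f word]) acc
      = acc ++ (wordsOfInt l suf).map f := by
  intro suf
  induction suf with
  | nil => intro n acc _; simp [PySem.List.enumerate, wordsOfInt]
  | cons p suf' ih =>
    intro n acc hdrop
    have hlen : ps.length = n + 1 + suf'.length := by
      have h1 := congrArg List.length hdrop
      simp only [List.length_drop, List.length_cons] at h1
      have hn : n ≤ ps.length := by
        by_contra hn
        have h2 : ps.drop n = [] := List.drop_eq_nil_of_le (by omega)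
        rw [hdrop] at h2; simp at h2
      omega
    have hdrop' : ps.drop (n + 1) = suf' := by
      have h1 : ps.drop (n + 1) = (ps.drop n).drop 1 := by rw [List.drop_drop]
      rw [h1, hdrop]; rfl
    rw [PySem.List.enumerate_cons]
    have hc : ((n : Int) + 1) = ((n + 1 : Nat) : Int) := by push_cast; ring
    cases suf' with
    | nil =>
      have hcond : ¬ (((n + 1 : Nat) : Int) < (ps.length : Int)) := by
        rw [hlen]; push_cast [List.length_nil]; omega
      simp only [List.foldl_cons, hc, hcond, ih (n + 1) _ hdrop']
      simp [wordsOfInt]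
    | cons q t =>
      have hcond : (((n + 1 : Nat) : Int) < (ps.length : Int)) := by
        rw [hlen]; push_cast [List.length_cons]; omega
      have hget : PySem.List.pyGetD ps (((n + 1 : Nat) : Int)) 0 = q := by
        rw [PySem.List.pyGetD_natCast]
        have h1 : ps[n + 1]? = some q := by
          have h2 : (ps.drop (n + 1))[0]? = ps[n + 1 + 0]? := List.getElem?_drop
          rw [hdrop'] at h2
          simpa using h2.symm
        simp [List.getD, h1]
      simp only [List.foldl_cons, hc, hcond, hget, ih (n + 1) _ hdrop']
      simp [wordsOfInt]

theorem wordsOfInt_cast (l : List Char) : ∀ (ps : List Nat) (a : Nat),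
    wordsOfInt l ((a :: ps).map (fun (k : Nat) => (k : Int))) = wordsN l a ps := by
  intro ps
  induction ps with
  | nil =>
    intro a
    simp only [List.map_cons, List.map_nil]
    simp [wordsOfInt, wordsN, PySem.List.slice_from_natCast]
  | cons p t ih =>
    intro a
    have h1 : (a :: p :: t).map (fun (k : Nat) => (k : Int))
        = (a : Int) :: (p : Int) :: t.map (fun (k : Nat) => (k : Int)) := by simp
    rw [h1]
    have h2 : wordsOfInt l ((a : Int) :: (p : Int) :: t.map (fun (k : Nat) => (k : Int)))
        = PySem.List.slice l (some (a : Int)) (some (p : Int))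
          :: wordsOfInt l ((p : Int) :: t.map (fun (k : Nat) => (k : Int))) := rfl
    rw [h2]
    have h3 : ((p : Int) :: t.map (fun (k : Nat) => (k : Int))) = (p :: t).map (fun (k : Nat) => (k : Int)) := by
      simp
    rw [h3, ih p, PySem.List.slice_natCast]
    rfl

theorem goW_wordsN (l : List Char) : ∀ (rest : List Char) (i a : Nat) (cur : List Char),
    l.drop i = rest → a + cur.length = i → cur = (l.drop a).take (i - a) →
    goW cur rest = wordsN l a (upPos i rest) := by
  intro rest
  induction rest with
  | nil =>
    intro i a cur hdrop hlen hcur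
    have hi : l.length ≤ i := by
      by_contra h
      have : l.drop i ≠ [] := by simp; omega
      exact this hdrop
    have : (l.drop a).take (i - a) = l.drop a := by
      apply List.take_of_length_le
      simp; omega
    simp [goW, upPos, wordsN, hcur, this]
  | cons c rest' ih =>
    intro i a cur hdrop hlen hcur
    have hil : i < l.length := by
      by_contra h
      have : l.drop i = [] := List.drop_eq_nil_of_le (by omega)
      rw [hdrop] at this; simp at this
    have hdrop' : l.drop (i + 1) = rest' := by
      have h1 : l.drop (i + 1) = (l.drop i).drop 1 := by rw [List.drop_drop]
      rw [h1, hdrop]; rfl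
    have hgl : l[i]? = some c := by
      have h1 : (l.drop i)[0]? = l[i + 0]? := List.getElem?_drop
      rw [hdrop] at h1; simpa using h1.symm
    by_cases h : PySem.Chars.isupper c
    · have hnew : [c] = (l.drop i).take (i + 1 - i) := by
        rw [hdrop]; simp
      simp only [goW, h, if_true, upPos, wordsN]
      rw [← hcur, ih (i + 1) i [c] hdrop' (by simp) hnew]
    · have hnext : cur ++ [c] = (l.drop a).take (i + 1 - a) := by
        have hs : i + 1 - a = (i - a) + 1 := by omega
        rw [hs, List.take_add_one]
        have : (l.drop a)[i - a]? = l[a + (i - a)]? := List.getElem?_drop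
        have ha : a + (i - a) = i := by omega
        rw [ha] at this
        rw [← hcur, this, hgl]
        rfl
      simp only [goW, h, upPos]
      exact ih (i + 1) a (cur ++ [c]) hdrop' (by simp; omega) hnext

theorem bFold (rest : List Char) : ∀ (ws : List (List Char)) (cur : List Char) (n : Nat),
    (((PySem.List.enumerate rest ((n : Int) + 1)).foldl
      (fun (st : List (List Char) × List Char) p =>
        if PySem.Chars.isupper p.2 && p.1 != 0 then (st.1 ++ [st.2], [p.2])
        else (st.1, st.2 ++ [p.2])) (ws, cur)).1
     ++ [((PySem.List.enumerate rest ((n : Int) + 1)).foldl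
      (fun (st : List (List Char) × List Char) p =>
        if PySem.Chars.isupper p.2 && p.1 != 0 then (st.1 ++ [st.2], [p.2])
        else (st.1, st.2 ++ [p.2])) (ws, cur)).2])
      = ws ++ goW cur rest := by
  induction rest with
  | nil => intro ws cur n; simp [PySem.List.enumerate, goW]
  | cons c rest' ih =>
    intro ws cur n
    rw [PySem.List.enumerate_cons]
    have hne : (((n : Int) + 1) != 0) = true := by
      simp only [bne_iff_ne, ne_eq]
      omega
    have hc : ((n : Int) + 1 + 1) = ((n + 1 : Nat) : Int) + 1 := by push_cast; ring
    by_cases h : PySem.Chars.isupper c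
    · simp only [List.foldl_cons, h, hne, Bool.and_self, if_true, hc, ih]
      simp [goW, h]
    · simp only [List.foldl_cons, h, Bool.false_and, hc, ih]
      simp [goW, h]

-- the shared pre-lowering word list of both programs
theorem words_common (l : List Char) (f : List Char → List Char) :
    (PySem.List.enumerate ((0 :: upPos 1 l.tail).map (fun (k : Nat) => (k : Int))) 0).foldl
      (fun ws p =>
        let word :=
          if p.1 + 1 < (((0 :: upPos 1 l.tail).map (fun (k : Nat) => (k : Int))).length : Int) then
            PySem.List.slice l (some p.2)
              (some (PySem.List.pyGetD ((0 :: upPos 1 l.tail).map (fun (k : Nat) => (k : Int))) (p.1 + 1) 0))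
          else
            PySem.List.slice l (some p.2) none
        ws ++ [f word]) []
      = (wordsN l 0 (upPos 1 l.tail)).map f := by
  have h := innerFold l f ((0 :: upPos 1 l.tail).map (fun (k : Nat) => (k : Int)))
      ((0 :: upPos 1 l.tail).map (fun (k : Nat) => (k : Int))) 0 [] (by simp)
  simp only [Nat.cast_zero] at h
  rw [h, wordsOfInt_cast]
  simp

theorem bWords (l : List Char) :
    (((PySem.List.enumerate l 0).foldl
      (fun (st : List (List Char) × List Char) p =>
        if PySem.Chars.isupper p.2 && p.1 != 0 then (st.1 ++ [st.2], [p.2])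
        else (st.1, st.2 ++ [p.2])) ([], [])).1
     ++ [((PySem.List.enumerate l 0).foldl
      (fun (st : List (List Char) × List Char) p =>
        if PySem.Chars.isupper p.2 && p.1 != 0 then (st.1 ++ [st.2], [p.2])
        else (st.1, st.2 ++ [p.2])) ([], [])).2])
      = wordsN l 0 (upPos 1 l.tail) := by
  cases hl : l with
  | nil => simp [PySem.List.enumerate, upPos, wordsN]
  | cons c rest =>
    rw [PySem.List.enumerate_cons]
    simp only [List.foldl_cons, bne_self_eq_false, Bool.and_false, Bool.false_eq_true, if_false]
    have h01 : ((0 : Int) + 1) = ((0 : Nat) : Int) + 1 := by norm_num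
    rw [h01, bFold rest [] ([] ++ [c]) 0]
    have hkey := goW_wordsN (c :: rest) rest 1 0 [c] (by simp) (by simp) (by simp)
    simpa using hkey

theorem firstFold0 (r : List Char) :
    (PySem.List.enumerate r 0).foldl
      (fun acc p => if PySem.Chars.isupper p.2 then acc ++ [p.1] else acc) []
      = (upPos 0 r).map (fun (k : Nat) => (k : Int)) := by
  have h := firstFold r 0 []
  simp only [Nat.cast_zero, List.nil_append] at h
  exact h

theorem create_label_eq (uri type : String) : create_label uri type = create_label_alt uri type := by
  unfold create_label create_label_alt
  simp only []
  rw [firstFold0 uri.toList, branch_eq uri.toList]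
  by_cases ht : (type == "property") = true
  · simp only [ht, if_true]
    rw [words_common uri.toList PySem.Chars.lower, bWords uri.toList]
  · simp only [Bool.not_eq_true] at ht
    simp only [ht, Bool.false_eq_true, if_false]
    have h := words_common uri.toList (fun w => w)
    rw [h, bWords uri.toList]
    simp

-- ===== VERDICT (by name: the statement is the Claim_ definition above) =====
theorem create_label_spec : Claim_equal_create_label := by
  intro uri type _
  unfold Spec_create_label
  exact create_label_eq uri type
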